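-- pv_equiv track=rewrite | github.com/ma-ben/Back-end-written-test-questions | b.py | matchparen
-- ===== SOURCE A (Python) =====
-- def matchparen(str):
--     str = list(str)
--     stack = []
--     for i, c in enumerate(str):
--         if c == '(': # 左括号入栈
--             stack.append(i)
--         elif c == ')':
--             if not stack: # 没有左括号匹配打?
--                 str[i] = '?'
--             else:
--                 str[i] = ' ' # 匹配打空格
--                 str[stack.pop()] = ' '
--         else: # 其他字符打空格
--             str[i] = ' '
--     for i in stack: # 剩下打左括号打x
--         str[i] = 'x'
--     return ''.join(str)
-- ===== SOURCE B (Python) =====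
-- def matchparen(str):
--     s = list(str)
--     res = [' '] * len(s)
--     opens = 0
--     for i, c in enumerate(s):
--         if c == '(':
--             opens += 1
--         elif c == ')':
--             if opens > 0:
--                 opens -= 1
--             else:
--                 res[i] = '?'
--     close = 0
--     for i, c in reversed(list(enumerate(s))):
--         if c == ')':
--             close += 1
--         elif c == '(':
--             if close > 0:
--                 close -= 1
--             else:
--                 res[i] = 'x'
--     return ''.join(res)
-- ===== Notes on version B (the rewrite author's own statement) =====
-- stated objective: alternative
-- what changed: Replaces the index stack and final stack-marking pass with two scalar balance counters: a forward scan flags unmatched ')' as '?', a backward scan flags unmatched '(' as 'x', writing into a pre-filled array of spaces.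
import Mathlib
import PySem

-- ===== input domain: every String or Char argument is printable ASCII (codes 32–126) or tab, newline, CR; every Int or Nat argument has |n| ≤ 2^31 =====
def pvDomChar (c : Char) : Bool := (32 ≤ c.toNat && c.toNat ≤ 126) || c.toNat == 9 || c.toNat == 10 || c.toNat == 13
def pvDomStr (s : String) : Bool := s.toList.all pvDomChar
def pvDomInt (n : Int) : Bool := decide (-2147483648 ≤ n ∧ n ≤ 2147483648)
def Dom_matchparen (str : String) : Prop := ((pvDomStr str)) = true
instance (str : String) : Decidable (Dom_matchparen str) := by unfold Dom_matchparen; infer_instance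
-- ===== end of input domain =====

-- B replaces A's index stack (and its final stack-marking pass) with two scalar balance
-- counters: a forward scan flags unmatched ')' as '?', a backward scan flags unmatched '('
-- as 'x' (alternative decomposition, same O(n) cost).

-- ===== PORT A =====
-- Transliteration notes (exact on this code's inputs): 'str = list(str)' → work on str.toList;
-- 'for i, c in enumerate(str)' → foldl over List.zipIdx (Nat indices, exact since enumerate
-- yields 0..n-1); 'str[i] = v' → List.set (every index used is in range: enumerate indices and
-- stack entries, all < len); stack.append(i) / stack.pop() → ++ [i] / getLast? & dropLast;
-- ''.join(str) of one-char strings → String.ofList.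
def matchparenStep (st : List Char × List Nat) (p : Char × Nat) : List Char × List Nat :=
  if p.1 = '(' then (st.1, st.2 ++ [p.2])
  else if p.1 = ')' then
    match st.2.getLast? with
    | none => (st.1.set p.2 '?', st.2)
    | some j => ((st.1.set p.2 ' ').set j ' ', st.2.dropLast)
  else (st.1.set p.2 ' ', st.2)

def matchparen (str : String) : String :=
  let r := (str.toList.zipIdx).foldl matchparenStep (str.toList, [])
  String.ofList (r.2.foldl (fun o i => o.set i 'x') r.1)

-- ===== PORT B =====
-- Transliteration notes: same conventions as port A; the counters 'opens'/'close' are Nat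
-- (exact: the Python ints never go negative, every decrement is guarded by '> 0');
-- 'reversed(list(enumerate(s)))' → (List.zipIdx).reverse.
def matchparenFwd (st : List Char × Nat) (p : Char × Nat) : List Char × Nat :=
  if p.1 = '(' then (st.1, st.2 + 1)
  else if p.1 = ')' then
    if st.2 > 0 then (st.1, st.2 - 1) else (st.1.set p.2 '?', st.2)
  else st

def matchparenBwd (st : List Char × Nat) (p : Char × Nat) : List Char × Nat :=
  if p.1 = ')' then (st.1, st.2 + 1)
  else if p.1 = '(' then
    if st.2 > 0 then (st.1, st.2 - 1) else (st.1.set p.2 'x', st.2)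
  else st

def matchparen_alt (str : String) : String :=
  let s := str.toList
  let r1 := (s.zipIdx).foldl matchparenFwd (List.replicate s.length ' ', 0)
  let r2 := (s.zipIdx).reverse.foldl matchparenBwd (r1.1, 0)
  String.ofList r2.1

-- ===== PRECONDITION & SPEC =====
def Spec_matchparen (str : String) (out : String) : Prop := out = matchparen_alt str
instance (str : String) (out : String) : Decidable (Spec_matchparen str out) := by unfold Spec_matchparen; infer_instance

-- ===== CLAIM (what is proved, stated in full; the proofs are below) =====
def Claim_equal_matchparen : Prop := ∀ (str : String), Dom_matchparen str → Spec_matchparen str (matchparen str)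

-- ===== LEMMAS AND PROOFS =====

-- Proof-side abbreviations for the two programs' components (lists throughout).
def pvMarkX (res : List Char) (l : List Nat) : List Char :=
  l.foldl (fun o i => o.set i 'x') res

def pvOutA (s : List Char) : List Char := ((s.zipIdx).foldl matchparenStep (s, [])).1
def pvStkA (s : List Char) : List Nat := ((s.zipIdx).foldl matchparenStep (s, [])).2
def pvA (s : List Char) : List Char := pvMarkX (pvOutA s) (pvStkA s)

def pvResF (s : List Char) : List Char :=
  ((s.zipIdx).foldl matchparenFwd (List.replicate s.length ' ', 0)).1
def pvCntF (s : List Char) : Nat :=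
  ((s.zipIdx).foldl matchparenFwd (List.replicate s.length ' ', 0)).2
def pvB (s : List Char) : List Char :=
  ((s.zipIdx).reverse.foldl matchparenBwd (pvResF s, 0)).1

-- The indices the backward pass writes 'x' to, in processing order, as a function of the
-- initial counter value.
def pvBwdMarks : Nat → List (Char × Nat) → List Nat
  | _, [] => []
  | c, (ch, i) :: l =>
    if ch = ')' then pvBwdMarks (c + 1) l
    else if ch = '(' then
      match c with
      | 0 => i :: pvBwdMarks 0 l
      | c' + 1 => pvBwdMarks c' l
    else pvBwdMarks c l

theorem pvMarkX_length (l : List Nat) (res : List Char) :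
    (pvMarkX res l).length = res.length := by
  induction l generalizing res with
  | nil => rfl
  | cons i l ih => simpa [pvMarkX] using ih (res.set i 'x')

theorem pvMarkX_getElem? (l : List Nat) (res : List Char) (p : Nat) :
    (pvMarkX res l)[p]? = if p ∈ l ∧ p < res.length then some 'x' else res[p]? := by
  induction l generalizing res with
  | nil => simp [pvMarkX]
  | cons i l ih =>
    have h1 : pvMarkX res (i :: l) = pvMarkX (res.set i 'x') l := rfl
    rw [h1, ih, List.getElem?_set]
    by_cases hpl : p ∈ l <;> by_cases hpi : p = i <;> by_cases hlt : p < res.length <;>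
      first
      | (simp_all; omega)
      | simp_all

theorem pvMarkX_append (l : List Nat) (res : List Char) (c : Char)
    (hb : ∀ x ∈ l, x < res.length) :
    pvMarkX (res ++ [c]) l = pvMarkX res l ++ [c] := by
  induction l generalizing res with
  | nil => rfl
  | cons i l ih =>
    have hi : i < res.length := hb i (by simp)
    have h1 : pvMarkX (res ++ [c]) (i :: l) = pvMarkX ((res ++ [c]).set i 'x') l := rfl
    rw [h1, List.set_append_left _ _ hi,
        ih (res.set i 'x') (by simpa using fun x hx => hb x (List.mem_cons_of_mem i hx))]
    rfl

theorem pvBwd_eq_markX (l : List (Char × Nat)) (res : List Char) (c : Nat) :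
    (l.foldl matchparenBwd (res, c)).1 = pvMarkX res (pvBwdMarks c l) := by
  induction l generalizing res c with
  | nil => rfl
  | cons p l ih =>
    obtain ⟨ch, i⟩ := p
    by_cases h1 : ch = ')'
    · simp [matchparenBwd, pvBwdMarks, h1, ih]
    · by_cases h2 : ch = '('
      · cases c with
        | zero =>
          have : pvMarkX res (i :: pvBwdMarks 0 l) = pvMarkX (res.set i 'x') (pvBwdMarks 0 l) := rfl
          simp [matchparenBwd, pvBwdMarks, h2, this, ih]
        | succ c' => simp [matchparenBwd, pvBwdMarks, h2, ih]
      · simp [matchparenBwd, pvBwdMarks, h1, h2, ih]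

theorem pvBwdMarks_succ (l : List (Char × Nat)) (c : Nat) :
    pvBwdMarks (c + 1) l = (pvBwdMarks c l).tail := by
  induction l generalizing c with
  | nil => rfl
  | cons p l ih =>
    obtain ⟨ch, i⟩ := p
    by_cases h1 : ch = ')'
    · simp [pvBwdMarks, h1, ih]
    · by_cases h2 : ch = '('
      · cases c with
        | zero => simp [pvBwdMarks, h2]
        | succ c' => simp [pvBwdMarks, h2, ih]
      · simp [pvBwdMarks, h1, h2, ih]

theorem pvFoldA_append (l : List (Char × Nat)) (res : List Char) (stk : List Nat) (c : Char)
    (hl : ∀ p ∈ l, p.2 < res.length) (hs : ∀ x ∈ stk, x < res.length) :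
    l.foldl matchparenStep (res ++ [c], stk)
      = ((l.foldl matchparenStep (res, stk)).1 ++ [c], (l.foldl matchparenStep (res, stk)).2) := by
  induction l generalizing res stk with
  | nil => rfl
  | cons p l ih =>
    obtain ⟨ch, i⟩ := p
    have hi : i < res.length := hl (ch, i) (by simp)
    have hl' : ∀ p ∈ l, p.2 < res.length := fun p hp => hl p (List.mem_cons_of_mem _ hp)
    by_cases h1 : ch = '('
    · have hs' : ∀ x ∈ stk ++ [i], x < res.length := by
        intro x hx
        rcases List.mem_append.1 hx with h | h
        · exact hs x h
        · simp_all
      simpa [matchparenStep, h1] using ih res (stk ++ [i]) hl' hs'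
    · by_cases h2 : ch = ')'
      · rcases hgl : stk.getLast? with _ | j
        · simpa [matchparenStep, h1, h2, hgl, List.set_append_left _ _ hi] using
            ih (res.set i '?') stk (by simpa using hl') (by simpa using hs)
        · have hj : j < res.length := hs j (List.mem_of_getLast? hgl)
          simpa [matchparenStep, h1, h2, hgl, List.set_append_left _ _ hi,
                 List.set_append_left _ _ (by simpa using hj : j < (res.set i ' ').length)] using
            ih ((res.set i ' ').set j ' ') stk.dropLast (by simpa using hl')
              (fun x hx => by simpa using hs x (List.dropLast_subset stk hx))
      · simpa [matchparenStep, h1, h2, List.set_append_left _ _ hi] using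
          ih (res.set i ' ') stk (by simpa using hl') (by simpa using hs)

theorem pvFoldF_append (l : List (Char × Nat)) (res : List Char) (k : Nat) (c : Char)
    (hl : ∀ p ∈ l, p.2 < res.length) :
    l.foldl matchparenFwd (res ++ [c], k)
      = ((l.foldl matchparenFwd (res, k)).1 ++ [c], (l.foldl matchparenFwd (res, k)).2) := by
  induction l generalizing res k with
  | nil => rfl
  | cons p l ih =>
    obtain ⟨ch, i⟩ := p
    have hi : i < res.length := hl (ch, i) (by simp)
    have hl' : ∀ p ∈ l, p.2 < res.length := fun p hp => hl p (List.mem_cons_of_mem _ hp)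
    by_cases h1 : ch = '('
    · simpa [matchparenFwd, h1] using ih res (k + 1) hl'
    · by_cases h2 : ch = ')'
      · cases k with
        | zero =>
          simpa [matchparenFwd, h1, h2, List.set_append_left _ _ hi] using
            ih (res.set i '?') 0 (by simpa using hl')
        | succ k' => simpa [matchparenFwd, h1, h2] using ih res k' hl'
      · simpa [matchparenFwd, h1, h2] using ih res k hl'

-- The key exchange step: when a new ')' consumes A's most recent open index j (= stk.getLast),
-- B's backward pass instead skips the same position; both results agree pointwise.
theorem pvFlipEq (outA resF : List Char) (stk : List Nat) (hne : stk ≠ [])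
    (hlo : outA.length = resF.length)
    (hmem : ∀ x ∈ stk, x < resF.length)
    (hsp : ∀ x ∈ stk, resF[x]? = some ' ')
    (hIH : pvMarkX outA stk = pvMarkX resF stk.reverse) :
    pvMarkX (outA.set (stk.getLast hne) ' ') stk.dropLast
      = pvMarkX resF stk.dropLast.reverse := by
  set j := stk.getLast hne with hj
  have hjmem : j ∈ stk := List.getLast_mem hne
  have hjlt : j < resF.length := hmem j hjmem
  apply List.ext_getElem?
  intro p
  have hp := congrArg (fun t => t[p]?) hIH
  simp only [pvMarkX_getElem?, hlo, List.mem_reverse] at hp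
  simp only [pvMarkX_getElem?, List.length_set, hlo, List.mem_reverse]
  by_cases hpd : p ∈ stk.dropLast ∧ p < resF.length
  · simp [hpd]
  · rw [if_neg hpd, if_neg hpd, List.getElem?_set]
    by_cases hpj : j = p
    · subst hpj
      rw [if_pos rfl, if_pos (hlo ▸ hjlt), hsp j hjmem]
    · rw [if_neg hpj]
      by_cases hps : p ∈ stk ∧ p < resF.length
      · exfalso
        have hsplit : p ∈ stk.dropLast ∨ p = j := by
          have hcg := List.dropLast_concat_getLast hne
          rw [← hj] at hcg
          have hp2 : p ∈ stk.dropLast ++ [j] := by rw [hcg]; exact hps.1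
          simpa using hp2
        rcases hsplit with h | h
        · exact hpd ⟨h, hps.2⟩
        · exact hpj h.symm
      · simp only [hps, if_false] at hp
        exact hp

-- zipIdx indices are in range.
theorem pvZipIdx_lt (s : List Char) : ∀ p ∈ s.zipIdx, p.2 < s.length := by
  intro p hp
  obtain ⟨h1, h2⟩ := List.mem_zipIdx hp
  omega

-- The main invariant, proved by induction on the string from the right.
theorem pvMain (s : List Char) :
    pvA s = pvB s ∧ (pvStkA s).length = pvCntF s ∧ (∀ x ∈ pvStkA s, x < s.length) ∧
      (pvOutA s).length = s.length ∧ (pvResF s).length = s.length ∧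
      (pvStkA s).reverse = pvBwdMarks 0 (s.zipIdx).reverse ∧
      (∀ x ∈ pvStkA s, (pvResF s)[x]? = some ' ') := by
  induction s using List.reverseRecOn with
  | nil => simp [pvA, pvB, pvOutA, pvStkA, pvResF, pvCntF, pvMarkX, pvBwdMarks]
  | append_singleton s c ih =>
    obtain ⟨hAB, hcnt, hstk, hlenO, hlenF, hrev, hsp⟩ := ih
    set n := s.length with hn
    have hzip : (s ++ [c]).zipIdx = s.zipIdx ++ [(c, n)] := by simp [List.zipIdx_append]; try rfl
    -- A's state after the first n steps of the run on s ++ [c]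
    have hA0 : (s.zipIdx).foldl matchparenStep (s ++ [c], []) = (pvOutA s ++ [c], pvStkA s) := by
      rw [pvFoldA_append _ _ _ _ (pvZipIdx_lt s) (by simp)]; rfl
    have hOut : (s ++ [c]).zipIdx.foldl matchparenStep (s ++ [c], [])
        = matchparenStep (pvOutA s ++ [c], pvStkA s) (c, n) := by
      rw [hzip, List.foldl_append, hA0]; rfl
    -- B's forward state after the first n steps of the run on s ++ [c]
    have hF0 : (s.zipIdx).foldl matchparenFwd (List.replicate (n + 1) ' ', 0)
        = (pvResF s ++ [' '], pvCntF s) := by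
      rw [List.replicate_succ',
          pvFoldF_append _ _ _ _ (by intro p hp
                                     rw [List.length_replicate, hn]
                                     exact pvZipIdx_lt s p hp)]
      rfl
    have hFall : (s ++ [c]).zipIdx.foldl matchparenFwd (List.replicate (s ++ [c]).length ' ', 0)
        = matchparenFwd (pvResF s ++ [' '], pvCntF s) (c, n) := by
      have hlen1 : (s ++ [c]).length = n + 1 := by simp <;> omega
      rw [hzip, List.foldl_append, hlen1, hF0]
      rfl
    have hrevz : ((s ++ [c]).zipIdx).reverse = (c, n) :: (s.zipIdx).reverse := by
      rw [hzip]; simp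
    have hBmark : pvB s = pvMarkX (pvResF s) (pvBwdMarks 0 (s.zipIdx).reverse) := by
      rw [pvB, pvBwd_eq_markX]
    have hstkF : ∀ x ∈ (pvStkA s).reverse, x < (pvResF s).length := by
      intro x hx; rw [hlenF]; exact hstk x (List.mem_reverse.1 hx)
    by_cases hc1 : c = '('
    · -- unmatched-so-far '(': A pushes n (marked 'x' at the end); B's backward pass opens at
      -- counter 0 and marks n with 'x' immediately.
      subst hc1
      have hO : pvOutA (s ++ ['(']) = pvOutA s ++ ['('] := by
        rw [pvOutA, hOut, matchparenStep]; simp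
      have hS : pvStkA (s ++ ['(']) = pvStkA s ++ [n] := by
        rw [pvStkA, hOut, matchparenStep]; simp
      have hR : pvResF (s ++ ['(']) = pvResF s ++ [' '] := by
        rw [pvResF, hFall, matchparenFwd]; simp
      have hC : pvCntF (s ++ ['(']) = pvCntF s + 1 := by
        rw [pvCntF, hFall, matchparenFwd]; simp
      refine ⟨?_, ?_, ?_, ?_, ?_, ?_, ?_⟩
      · -- pvA = pvB
        have hBM : pvBwdMarks 0 ((s ++ ['(']).zipIdx).reverse
            = n :: pvBwdMarks 0 (s.zipIdx).reverse := by
          rw [hrevz]; simp [pvBwdMarks]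
        have hset : (pvResF s ++ [' ']).set n 'x' = pvResF s ++ ['x'] := by
          conv_lhs => rw [← hlenF]
          simp [List.set_append]
        have hBside : pvB (s ++ ['(']) = pvB s ++ ['x'] := by
          rw [pvB, pvBwd_eq_markX, hR, hBM]
          have : pvMarkX (pvResF s ++ [' ']) (n :: pvBwdMarks 0 (s.zipIdx).reverse)
              = pvMarkX (pvResF s ++ ['x']) (pvBwdMarks 0 (s.zipIdx).reverse) := by
            rw [pvMarkX]
            simp only [List.foldl_cons, hset]
            rfl
          rw [this, ← hrev, pvMarkX_append _ _ _ hstkF, hBmark, ← hrev]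
        have hAside : pvA (s ++ ['(']) = pvA s ++ ['x'] := by
          rw [pvA, hO, hS, pvMarkX, List.foldl_append]
          have h1 : (pvStkA s).foldl (fun o i => o.set i 'x') (pvOutA s ++ ['('])
              = pvMarkX (pvOutA s) (pvStkA s) ++ ['('] := by
            exact pvMarkX_append _ _ _ (by rw [hlenO]; exact hstk)
          rw [h1]
          simp only [List.foldl_cons, List.foldl_nil]
          have hlM : (pvMarkX (pvOutA s) (pvStkA s)).length = n := by
            rw [pvMarkX_length, hlenO]
          conv_lhs => rw [← hlM]
          simp [List.set_append, pvA]
        rw [hAside, hBside, hAB]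
      · rw [hS, hC]; simp [hcnt]
      · rw [hS]; intro x hx
        have hlen1 : (s ++ ['(']).length = n + 1 := by simp <;> omega
        rw [hlen1]
        rcases List.mem_append.1 hx with h | h
        · have := hstk x h; omega
        · simp at h; omega
      · rw [hO]; simp [hlenO]; try rfl
      · rw [hR]; simp [hlenF]; try rfl
      · rw [hS, hrevz]
        simp [pvBwdMarks, hrev]
      · rw [hS, hR]; intro x hx
        rcases List.mem_append.1 hx with h | h
        · rw [List.getElem?_append_left (by rw [hlenF]; exact hstk x h)]
          exact hsp x h
        · simp at h; subst h
          rw [List.getElem?_append_right (by omega), hlenF]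
          simp
    · by_cases hc2 : c = ')'
      · subst hc2
        rcases hgl : (pvStkA s).getLast? with _ | j
        · -- stack empty: the new ')' is unmatched; both sides append '?'
          have hemp : pvStkA s = [] := List.getLast?_eq_none_iff.1 hgl
          have hcnt0 : pvCntF s = 0 := by rw [← hcnt, hemp]; rfl
          have hO : pvOutA (s ++ [')']) = pvOutA s ++ ['?'] := by
            rw [pvOutA, hOut, matchparenStep]
            simp only [hgl]
            conv_lhs => rw [← hlenO]
            simp [List.set_append]
          have hS : pvStkA (s ++ [')']) = [] := by
            rw [pvStkA, hOut, matchparenStep]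
            simp [hgl, hemp]
          have hR : pvResF (s ++ [')']) = pvResF s ++ ['?'] := by
            rw [pvResF, hFall, matchparenFwd]
            simp only [hcnt0]
            conv_lhs => rw [← hlenF]
            simp [List.set_append]
          have hC : pvCntF (s ++ [')']) = 0 := by
            rw [pvCntF, hFall, matchparenFwd]; simp [hcnt0]
          have hBM : pvBwdMarks 0 ((s ++ [')']).zipIdx).reverse = [] := by
            rw [hrevz]
            have h1 : pvBwdMarks 0 ((')', n) :: (s.zipIdx).reverse)
                = pvBwdMarks 1 (s.zipIdx).reverse := by simp [pvBwdMarks]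
            rw [h1, pvBwdMarks_succ, ← hrev, hemp]
            rfl
          have hrev0 : pvBwdMarks 0 (s.zipIdx).reverse = [] := by rw [← hrev, hemp]; rfl
          refine ⟨?_, by rw [hS, hC]; rfl, by rw [hS]; simp, by rw [hO]; simp [hlenO]; try rfl,
                  by rw [hR]; simp [hlenF]; try rfl, by rw [hS, hBM]; rfl, by rw [hS]; simp⟩
          have hOR : pvOutA s = pvResF s := by
            have h := hAB
            rw [pvA, hemp, hBmark, hrev0] at h
            exact h
          rw [pvA, pvB, pvBwd_eq_markX, hO, hS, hR, hBM, hOR]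
        · -- stack nonempty: A pops j = getLast and blanks it; B's backward pass starts at
          -- counter 1 and skips exactly that position (pvBwdMarks_succ + pvFlipEq).
          have hne : pvStkA s ≠ [] := by
            intro h; rw [h] at hgl; simp at hgl
          have hj : j = (pvStkA s).getLast hne := by
            rw [List.getLast?_eq_some_getLast hne] at hgl; exact (Option.some.inj hgl).symm
          have hjmem : j ∈ pvStkA s := List.mem_of_getLast? hgl
          have hjlt : j < n := hstk j hjmem
          have hcntpos : 0 < pvCntF s := by
            rw [← hcnt]
            exact List.length_pos_of_ne_nil hne
          have hO : pvOutA (s ++ [')']) = (pvOutA s).set j ' ' ++ [' '] := by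
            rw [pvOutA, hOut, matchparenStep]
            simp only [hgl]
            have h1 : (pvOutA s ++ [')']).set n ' ' = pvOutA s ++ [' '] := by
              conv_lhs => rw [← hlenO]
              simp [List.set_append]
            have h2 : (pvOutA s ++ [' ']).set j ' ' = (pvOutA s).set j ' ' ++ [' '] := by
              exact List.set_append_left _ _ (hlenO ▸ hjlt)
            simp only [reduceIte, Char.reduceEq]
            rw [h1, h2]
          have hS : pvStkA (s ++ [')']) = (pvStkA s).dropLast := by
            rw [pvStkA, hOut, matchparenStep]
            simp [hgl]
          have hR : pvResF (s ++ [')']) = pvResF s ++ [' '] := by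
            rw [pvResF, hFall, matchparenFwd]
            simp [hcntpos]
          have hC : pvCntF (s ++ [')']) = pvCntF s - 1 := by
            rw [pvCntF, hFall, matchparenFwd]
            simp [hcntpos]
          have hBM : pvBwdMarks 0 ((s ++ [')']).zipIdx).reverse
              = ((pvStkA s).dropLast).reverse := by
            rw [hrevz]
            have h1 : pvBwdMarks 0 ((')', n) :: (s.zipIdx).reverse)
                = pvBwdMarks 1 (s.zipIdx).reverse := by simp [pvBwdMarks]
            rw [h1, pvBwdMarks_succ, ← hrev, List.tail_reverse]
          have hdropb : ∀ x ∈ ((pvStkA s).dropLast).reverse, x < (pvResF s).length := by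
            intro x hx
            rw [hlenF]
            exact hstk x (List.dropLast_subset _ (List.mem_reverse.1 hx))
          refine ⟨?_, ?_, ?_, by rw [hO]; simp [hlenO]; try rfl, by rw [hR]; simp [hlenF]; try rfl,
                  by rw [hS, hBM], ?_⟩
          · rw [pvA, pvB, pvBwd_eq_markX, hO, hS, hR, hBM,
                pvMarkX_append _ _ _ (by intro x hx
                                         rw [List.length_set, hlenO]
                                         exact hstk x (List.dropLast_subset _ hx)),
                pvMarkX_append _ _ _ hdropb]
            have hIH : pvMarkX (pvOutA s) (pvStkA s) = pvMarkX (pvResF s) (pvStkA s).reverse := by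
              rw [← pvA, hAB, hBmark, hrev]
            rw [hj, pvFlipEq (pvOutA s) (pvResF s) (pvStkA s) hne (by rw [hlenO, hlenF])
                  (by rw [hlenF]; exact hstk) hsp hIH]
          · rw [hS, hC, List.length_dropLast, hcnt]
          · rw [hS]; intro x hx
            have hlen1 : (s ++ [')']).length = n + 1 := by simp <;> omega
            have := hstk x (List.dropLast_subset _ hx)
            rw [hlen1]; omega
          · rw [hS, hR]; intro x hx
            have hxs : x ∈ pvStkA s := List.dropLast_subset _ hx
            rw [List.getElem?_append_left (by rw [hlenF]; exact hstk x hxs)]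
            exact hsp x hxs
      · -- any other character: both sides append ' '
        have hO : pvOutA (s ++ [c]) = pvOutA s ++ [' '] := by
          rw [pvOutA, hOut, matchparenStep]
          simp only [hc1, hc2, if_false]
          conv_lhs => rw [← hlenO]
          simp [List.set_append]
        have hS : pvStkA (s ++ [c]) = pvStkA s := by
          rw [pvStkA, hOut, matchparenStep]
          simp [hc1, hc2]
        have hR : pvResF (s ++ [c]) = pvResF s ++ [' '] := by
          rw [pvResF, hFall, matchparenFwd]
          simp [hc1, hc2]
        have hC : pvCntF (s ++ [c]) = pvCntF s := by
          rw [pvCntF, hFall, matchparenFwd]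
          simp [hc1, hc2]
        have hBM : pvBwdMarks 0 ((s ++ [c]).zipIdx).reverse
            = pvBwdMarks 0 (s.zipIdx).reverse := by
          rw [hrevz]
          simp [pvBwdMarks, hc1, hc2]
        refine ⟨?_, by rw [hS, hC, hcnt], ?_, by rw [hO]; simp [hlenO]; try rfl,
                by rw [hR]; simp [hlenF]; try rfl, by rw [hS, hBM, hrev], ?_⟩
        · rw [pvA, pvB, pvBwd_eq_markX, hO, hS, hR, hBM,
              pvMarkX_append _ _ _ (by rw [hlenO]; exact hstk),
              pvMarkX_append _ _ _ (by rw [hlenF, ← hrev]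
                                       intro x hx
                                       exact hstk x (List.mem_reverse.1 hx))]
          rw [← pvA, hAB, hBmark]
        · rw [hS]; intro x hx
          have hlen1 : (s ++ [c]).length = n + 1 := by simp <;> omega
          have := hstk x hx
          rw [hlen1]; omega
        · rw [hS, hR]; intro x hx
          rw [List.getElem?_append_left (by rw [hlenF]; exact hstk x hx)]
          exact hsp x hx

-- ===== VERDICT (by name: the statement is the Claim_ definition above) =====
theorem matchparen_spec : Claim_equal_matchparen := by
  intro str _
  show matchparen str = matchparen_alt str
  have h := (pvMain str.toList).1
  simpa [matchparen, matchparen_alt, pvA, pvOutA, pvStkA, pvB, pvResF, pvMarkX] using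
    congrArg String.ofList h
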